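-- pv_equiv track=rewrite | github.com/Eben-Success/A2SVOnboarding | E. Pair of Topics.py | topic_pairs
-- ===== SOURCE A (Python) =====
-- from typing import List
--
-- def topic_pairs(n, teach: List[int], std: List[int]) -> int:
--
--     res = []
--     for i in range(n):
--         res.append(teach[i] - std[i])
--     res.sort()
--
--     l, r = 0, n - 1
--     count = 0
--
--     while l < r:
--         if res[l] + res[r] <= 0:
--             l += 1
--         else:
--             count += r - l
--             r -= 1
--     return count
-- ===== SOURCE B (Python) =====
-- def topic_pairs(n, teach, std):
--     # Direct pair count: the number of pairs i<j with
--     # (teach[i]-std[i]) + (teach[j]-std[j]) > 0 is invariant under sorting,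
--     # so we count it straight off the difference values, no sort, no pointers.
--     count = 0
--     for i in range(n):
--         di = teach[i] - std[i]
--         for j in range(i + 1, n):
--             if di + (teach[j] - std[j]) > 0:
--                 count += 1
--     return count
-- ===== Notes on version B (the rewrite author's own statement) =====
-- stated objective: simpler
-- what changed: B drops the sort and the converging two-pointer sweep entirely and counts qualifying pairs directly with a plain nested loop over the raw differences (pair count is permutation-invariant), trading A's O(n log n) for a shorter O(n^2) program.
import Mathlib
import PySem

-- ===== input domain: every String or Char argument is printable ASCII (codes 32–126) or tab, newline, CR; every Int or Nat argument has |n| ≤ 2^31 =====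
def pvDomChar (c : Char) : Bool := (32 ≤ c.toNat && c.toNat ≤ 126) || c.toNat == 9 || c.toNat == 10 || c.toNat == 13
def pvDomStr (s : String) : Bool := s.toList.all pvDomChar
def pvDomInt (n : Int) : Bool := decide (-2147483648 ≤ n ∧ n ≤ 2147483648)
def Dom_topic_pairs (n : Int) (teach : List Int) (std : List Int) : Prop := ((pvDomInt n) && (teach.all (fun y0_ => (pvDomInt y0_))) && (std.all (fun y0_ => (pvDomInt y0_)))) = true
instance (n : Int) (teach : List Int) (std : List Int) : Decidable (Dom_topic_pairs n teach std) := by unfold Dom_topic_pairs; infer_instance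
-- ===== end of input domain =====

-- B replaces A's sort + two-pointer sweep by a direct nested-loop count of pairs i<j
-- whose difference sum is positive (objective: simpler).

-- ===== PORT A =====
-- the 'while l < r' loop of A, step for step
def topicPairsLoopA (res : List Int) (l r count : Int) : Int :=
  if _h : l < r then
    if PySem.List.pyGetD res l 0 + PySem.List.pyGetD res r 0 ≤ 0 then
      topicPairsLoopA res (l + 1) r count
    else
      topicPairsLoopA res l (r - 1) (count + (r - l))
  else count
termination_by (r - l).toNat
decreasing_by all_goals omega

def topic_pairs (n : Int) (teach : List Int) (std : List Int) : Int :=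
  let res := (PySem.List.pyRange 0 n 1).foldl
    (fun acc i => acc ++ [PySem.List.pyGetD teach i 0 - PySem.List.pyGetD std i 0]) []
  let res := PySem.List.sorted res (fun x => x) false
  topicPairsLoopA res 0 (n - 1) 0

-- ===== PORT B =====
def topic_pairs_alt (n : Int) (teach : List Int) (std : List Int) : Int :=
  (PySem.List.pyRange 0 n 1).foldl (fun count i =>
    let di := PySem.List.pyGetD teach i 0 - PySem.List.pyGetD std i 0
    (PySem.List.pyRange (i + 1) n 1).foldl (fun c j =>
      if di + (PySem.List.pyGetD teach j 0 - PySem.List.pyGetD std j 0) > 0 then c + 1 else c)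
      count) 0

-- ===== PRECONDITION & SPEC =====
-- A raises IndexError when n exceeds either list's length (teach[i] / std[i]); excluded.
def Pre_topic_pairs (n : Int) (teach : List Int) (std : List Int) : Prop :=
  n ≤ (teach.length : Int) ∧ n ≤ (std.length : Int)
instance (n : Int) (teach : List Int) (std : List Int) : Decidable (Pre_topic_pairs n teach std) := by unfold Pre_topic_pairs; infer_instance

def pvWitness_topic_pairs : Int × List Int × List Int := (3, [1, 2, 3], [3, 1, 1])

def Spec_topic_pairs (n : Int) (teach : List Int) (std : List Int) (out : Int) : Prop := out = topic_pairs_alt n teach std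
instance (n : Int) (teach : List Int) (std : List Int) (out : Int) : Decidable (Spec_topic_pairs n teach std out) := by unfold Spec_topic_pairs; infer_instance

-- ===== CLAIM (what is proved, stated in full; the proofs are below) =====
def Claim_equal_topic_pairs : Prop := ∀ (n : Int) (teach : List Int) (std : List Int), Dom_topic_pairs n teach std → Pre_topic_pairs n teach std → Spec_topic_pairs n teach std (topic_pairs n teach std)

-- ===== LEMMAS AND PROOFS =====

-- number of pairs i < j (by position) whose sum is positive
def pairCount : List Int → Nat
  | [] => 0
  | x :: xs => xs.countP (fun y => decide (x + y > 0)) + pairCount xs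

theorem pairCount_cons (x : Int) (xs : List Int) :
    pairCount (x :: xs) = xs.countP (fun y => decide (x + y > 0)) + pairCount xs := rfl

theorem pairCount_short (l : List Int) (h : l.length ≤ 1) : pairCount l = 0 := by
  match l, h with
  | [], _ => rfl
  | [x], _ => simp [pairCount]

theorem decide_add_comm (x y : Int) : decide (x + y > 0) = decide (y + x > 0) := by
  rw [Int.add_comm]

theorem pairCount_perm {xs ys : List Int} (h : xs.Perm ys) : pairCount xs = pairCount ys := by
  induction h with
  | nil => rfl
  | cons x h ih => simp [pairCount_cons, ih, h.countP_eq]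
  | swap x y l =>
      simp only [pairCount_cons, List.countP_cons]
      rw [decide_add_comm y x]
      omega
  | trans _ _ ih1 ih2 => exact ih1.trans ih2

theorem pairCount_append_singleton (xs : List Int) (y : Int) :
    pairCount (xs ++ [y]) = xs.countP (fun x => decide (x + y > 0)) + pairCount xs := by
  induction xs with
  | nil => simp [pairCount]
  | cons x xs ih =>
      simp only [List.cons_append, pairCount_cons, ih, List.countP_append, List.countP_cons,
        List.countP_nil]
      omega

-- B's inner loop is a count over the mapped differences
theorem foldl_if_count (d : Int → Int) (x : Int) :
    ∀ (L : List Int) (c : Int),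
      L.foldl (fun c j => if x + d j > 0 then c + 1 else c) c
        = c + ((L.map d).countP (fun y => decide (x + y > 0)) : Int) := by
  intro L
  induction L with
  | nil => simp
  | cons z zs ih =>
      intro c
      by_cases hz : x + d z > 0 <;>
        simp only [List.foldl_cons, List.map_cons, List.countP_cons, ih, hz,
          if_pos, if_neg, decide_eq_true_eq, not_false_eq_true] <;>
        push_cast <;> ring_nf

-- B's nested loop computes pairCount of the difference list
theorem altOuter (n : Int) (d : Int → Int) :
    ∀ (fuel : Nat) (a c : Int), (n - a).toNat = fuel →
      (PySem.List.pyRange a n 1).foldl (fun count i =>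
        (PySem.List.pyRange (i + 1) n 1).foldl (fun c j =>
          if d i + d j > 0 then c + 1 else c) count) c
      = c + (pairCount ((PySem.List.pyRange a n 1).map d) : Int) := by
  intro fuel
  induction fuel with
  | zero =>
      intro a c h
      rw [PySem.List.pyRange_one_eq_nil (by omega)]
      simp [pairCount]
  | succ k ih =>
      intro a c h
      rw [PySem.List.pyRange_one_cons (by omega)]
      simp only [List.foldl_cons, List.map_cons, pairCount_cons]
      rw [foldl_if_count d (d a), ih (a + 1) _ (by omega)]
      push_cast
      ring

-- sorted monotone access
theorem sorted_getElem_le {s : List Int} (hs : s.Pairwise (· ≤ ·)) {i j : Nat}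
    (hij : i ≤ j) (hj : j < s.length) : s[i] ≤ s[j] := by
  rcases Nat.lt_or_ge i j with hlt | hge
  · exact (List.pairwise_iff_getElem.mp hs) i j (by omega) hj hlt
  · have : i = j := by omega
    subst this; exact le_refl _

-- the segment s[l..r] as a list
def seg (s : List Int) (l r : Nat) : List Int := (s.drop l).take (r + 1 - l)

theorem seg_cons {s : List Int} {l r : Nat} (hl : l ≤ r) (hr : r < s.length) :
    seg s l r = s[l]'(by omega) :: seg s (l + 1) r := by
  unfold seg
  rw [List.drop_eq_getElem_cons (by omega)]
  have : r + 1 - l = (r - l) + 1 := by omega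
  rw [this, List.take_succ_cons]
  congr 2
  omega

theorem seg_append {s : List Int} {l r : Nat} (hlr : l < r) (hr : r < s.length) :
    seg s l r = seg s l (r - 1) ++ [s[r]] := by
  unfold seg
  have h1 : r + 1 - l = (r - l) + 1 := by omega
  rw [h1, List.take_add_one]
  have h2 : (s.drop l)[r - l]? = some s[r] := by
    rw [List.getElem?_drop]
    have : l + (r - l) = r := by omega
    rw [this, List.getElem?_eq_getElem hr]
  rw [h2]
  simp
  congr 1
  omega

theorem mem_seg_getElem {s : List Int} {l r : Nat} {y : Int} (h : y ∈ seg s l r)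
    (hr : r < s.length) : ∃ k, l ≤ k ∧ k ≤ r ∧ ∃ hk : k < s.length, s[k] = y := by
  unfold seg at h
  obtain ⟨i, hi, hy⟩ := List.getElem_of_mem h
  have hlen : ((s.drop l).take (r + 1 - l)).length = min (r + 1 - l) (s.length - l) := by
    simp
  rw [List.getElem_take, List.getElem_drop] at hy
  refine ⟨l + i, by omega, by omega, by omega, hy⟩

-- A's two-pointer loop counts pairs on a sorted list
theorem loopA_eq (s : List Int) (hs : s.Pairwise (· ≤ ·)) :
    ∀ (fuel : Nat) (l r : Nat) (c : Int), r - l ≤ fuel → r < s.length →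
      topicPairsLoopA s l r c = c + (pairCount (seg s l r) : Int) := by
  intro fuel
  induction fuel with
  | zero =>
      intro l r c hf hr
      rw [topicPairsLoopA]
      have hnl : ¬ ((l : Int) < (r : Int)) := by omega
      rw [dif_neg hnl]
      have : pairCount (seg s l r) = 0 := by
        apply pairCount_short
        simp only [seg, List.length_take, List.length_drop]
        omega
      omega
  | succ k ih =>
      intro l r c hf hr
      rw [topicPairsLoopA]
      by_cases hlr : l < r
      · rw [dif_pos (by exact_mod_cast hlr)]
        have hgl : PySem.List.pyGetD s (l : Int) 0 = s[l]'(by omega) := by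
          rw [PySem.List.pyGetD_natCast, List.getD_eq_getElem s 0 (by omega)]
        have hgr : PySem.List.pyGetD s (r : Int) 0 = s[r] := by
          rw [PySem.List.pyGetD_natCast, List.getD_eq_getElem s 0 hr]
        rw [hgl, hgr]
        by_cases hsum : s[l]'(by omega) + s[r] ≤ 0
        · rw [if_pos hsum]
          have h1 : ((l : Int) + 1) = ((l + 1 : Nat) : Int) := by push_cast; ring
          rw [h1, ih (l + 1) r c (by omega) hr]
          congr 2
          rw [seg_cons (l := l) (r := r) (by omega) hr, pairCount_cons]
          have hc0 : (seg s (l + 1) r).countP (fun y => decide (s[l]'(by omega) + y > 0)) = 0 := by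
            rw [List.countP_eq_zero]
            intro y hy
            obtain ⟨j, hlj, hjr, hj, hyj⟩ := mem_seg_getElem hy hr
            have : y ≤ s[r] := hyj ▸ sorted_getElem_le hs hjr hr
            simp
            omega
          omega
        · rw [if_neg hsum]
          have h1 : ((r : Int) - 1) = ((r - 1 : Nat) : Int) := by push_cast [Nat.cast_sub (by omega : 1 ≤ r)]; ring
          rw [h1, ih l (r - 1) _ (by omega) (by omega)]
          rw [seg_append hlr hr, pairCount_append_singleton]
          have hcl : (seg s l (r - 1)).countP (fun x => decide (x + s[r] > 0)) = (seg s l (r - 1)).length := by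
            rw [List.countP_eq_length]
            intro y hy
            obtain ⟨j, hlj, hjr, hj, hyj⟩ := mem_seg_getElem hy (by omega)
            have : s[l]'(by omega) ≤ y := hyj ▸ sorted_getElem_le hs hlj hj
            simp
            omega
          have hlen : (seg s l (r - 1)).length = r - l := by
            unfold seg
            simp
            omega
          rw [hcl, hlen]
          push_cast [Nat.cast_sub (by omega : l ≤ r)]
          ring
      · rw [dif_neg (by exact_mod_cast hlr)]
        have : pairCount (seg s l r) = 0 := by
          apply pairCount_short
          simp only [seg, List.length_take, List.length_drop]
          omega
        omega

-- ===== VERDICT (by name: the statement is the Claim_ definition above) =====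
theorem topic_pairs_spec : Claim_equal_topic_pairs := by
  intro n teach std _hdom _hpre
  simp only [Spec_topic_pairs, topic_pairs, topic_pairs_alt]
  have hres : (PySem.List.pyRange 0 n 1).foldl
      (fun acc i => acc ++ [PySem.List.pyGetD teach i 0 - PySem.List.pyGetD std i 0]) []
      = (PySem.List.pyRange 0 n 1).map (fun i => PySem.List.pyGetD teach i 0 - PySem.List.pyGetD std i 0) := by
    simpa using PySem.List.foldl_append_singleton_eq_map
      (f := fun i => PySem.List.pyGetD teach i 0 - PySem.List.pyGetD std i 0)
      (l := PySem.List.pyRange 0 n 1) (acc := [])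
  rw [hres, altOuter n (fun i => PySem.List.pyGetD teach i 0 - PySem.List.pyGetD std i 0)
    (n - 0).toNat 0 0 rfl]
  set res0 := (PySem.List.pyRange 0 n 1).map
    (fun i => PySem.List.pyGetD teach i 0 - PySem.List.pyGetD std i 0) with hres0
  set s := PySem.List.sorted res0 (fun x => x) false with hs0
  have hperm : s.Perm res0 := PySem.List.sorted_perm res0 (fun x => x) false
  have hsort : s.Pairwise (· ≤ ·) := by
    simpa using PySem.List.sorted_pairwise res0 (fun x => x)
  have hlen0 : res0.length = n.toNat := by
    simp [hres0, PySem.List.length_pyRange_one]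
  have hlen : s.length = n.toNat := by rw [hperm.length_eq, hlen0]
  have hpc : pairCount s = pairCount res0 := pairCount_perm hperm
  rcases le_or_gt n 1 with hn | hn
  · rw [topicPairsLoopA, dif_neg (by omega)]
    have : pairCount res0 = 0 := pairCount_short _ (by omega)
    omega
  · have hcast : ((n - 1).toNat : Int) = n - 1 := by omega
    have h1 : topicPairsLoopA s ((0 : Nat) : Int) (((n - 1).toNat : Nat) : Int) 0
        = 0 + (pairCount (seg s 0 (n - 1).toNat) : Int) :=
      loopA_eq s hsort (n - 1).toNat 0 (n - 1).toNat 0 (by omega) (by omega)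
    rw [Nat.cast_zero, hcast] at h1
    rw [h1]
    have hseg : seg s 0 (n - 1).toNat = s := by
      unfold seg
      rw [List.drop_zero]
      exact List.take_of_length_le (by omega)
    rw [hseg, hpc]
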